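-- pv_equiv track=rewrite | github.com/MindFigment/synesthesian-dreams | networks/utils.py | multiplies
-- ===== SOURCE A (Python) =====
-- def multiplies(m):
--     l = []
--     for i in range(m - 1):
--         if len(l) > 0:
--             l.append(l[i-1] * 2)
--         else:
--             l.append(2)
--     return l
-- ===== SOURCE B (Python) =====
-- def multiplies(m):
--     return [1 << (i + 1) for i in range(m - 1)]
-- ===== Notes on version B (the rewrite author's own statement) =====
-- stated objective: simpler
-- what changed: Replaces the accumulator loop that doubles the previously appended element with a direct per-index computation: each element is a one shifted left by its index plus one, removing the cross-iteration data dependency.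
import Mathlib
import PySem

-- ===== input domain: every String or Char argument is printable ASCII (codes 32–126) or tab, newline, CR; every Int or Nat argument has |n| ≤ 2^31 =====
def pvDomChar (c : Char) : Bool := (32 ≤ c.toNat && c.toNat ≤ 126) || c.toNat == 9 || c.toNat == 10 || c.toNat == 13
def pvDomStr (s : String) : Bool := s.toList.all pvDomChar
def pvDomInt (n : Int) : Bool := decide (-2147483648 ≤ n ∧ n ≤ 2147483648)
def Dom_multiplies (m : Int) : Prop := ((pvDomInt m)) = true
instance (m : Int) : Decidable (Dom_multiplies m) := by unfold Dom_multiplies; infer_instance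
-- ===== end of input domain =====

-- B replaces A's doubling accumulator with a per-index closed form (1 shifted left by i+1) (objective: simpler).

-- ===== PORT A =====
-- l[i-1]: in-range by the loop (the branch guarantees l nonempty, so pyGet? returns some; .getD 0 is never taken)
def multiplies (m : Int) : List Int :=
  (PySem.List.pyRange 0 (m - 1) 1).foldl
    (fun l i =>
      if l.length > 0 then l ++ [(PySem.List.pyGet? l (i - 1)).getD 0 * 2]
      else l ++ [2]) []

-- ===== PORT B =====
def multiplies_alt (m : Int) : List Int :=
  (PySem.List.pyRange 0 (m - 1) 1).map (fun i => (1 : Int) <<< (i + 1).toNat)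

-- ===== PRECONDITION & SPEC =====
def Spec_multiplies (m : Int) (out : List Int) : Prop := out = multiplies_alt m
instance (m : Int) (out : List Int) : Decidable (Spec_multiplies m out) := by unfold Spec_multiplies; infer_instance

-- ===== CLAIM (what is proved, stated in full; the proofs are below) =====
def Claim_equal_multiplies : Prop := ∀ (m : Int), Dom_multiplies m → Spec_multiplies m (multiplies m)

-- ===== LEMMAS AND PROOFS =====

theorem multiplies_fold_eq_map (n : Nat) :
    (PySem.List.pyRange 0 (n : Int) 1).foldl
      (fun l i =>
        if l.length > 0 then l ++ [(PySem.List.pyGet? l (i - 1)).getD 0 * 2]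
        else l ++ [2]) ([] : List Int)
    = (PySem.List.pyRange 0 (n : Int) 1).map (fun i => 2 ^ (i + 1).toNat) := by
  induction n with
  | zero => simp [PySem.List.pyRange_one_eq_nil]
  | succ n ih =>
    have hsplit : PySem.List.pyRange 0 ((n + 1 : Nat) : Int) 1
        = PySem.List.pyRange 0 (n : Int) 1 ++ [(n : Int)] := by
      have := PySem.List.pyRange_one_succ_right (a := 0) (b := (n : Int)) (by positivity)
      rw [show ((n + 1 : Nat) : Int) = (n : Int) + 1 by push_cast; ring, this]
    rw [hsplit, List.foldl_append, List.map_append, ih]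
    cases n with
    | zero => simp [PySem.List.pyRange_one_eq_nil]
    | succ k =>
      have hlen : ((PySem.List.pyRange 0 ((k + 1 : Nat) : Int) 1).map
          (fun i => (2:Int) ^ (i + 1).toNat)).length = k + 1 := by
        simp [PySem.List.length_pyRange_one]
      have hget : PySem.List.pyGet?
          ((PySem.List.pyRange 0 ((k + 1 : Nat) : Int) 1).map (fun i => (2:Int) ^ (i + 1).toNat))
          (((k + 1 : Nat) : Int) - 1) = some ((2:Int) ^ (k + 1)) := by
        have h1 : (((k + 1 : Nat) : Int) - 1) = ((k : Nat) : Int) := by push_cast; ring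
        rw [h1, PySem.List.pyGet?_natCast, List.getElem?_map, PySem.List.pyRange_one]
        simp
      simp only [List.foldl_cons, List.foldl_nil, gt_iff_lt]
      rw [if_pos (by rw [hlen]; omega), hget]
      simp only [Option.getD_some, List.map_cons, List.map_nil]
      have h3 : (((k + 1 : Nat) : Int) + 1).toNat = k + 2 := by omega
      have h4 : (2:Int) ^ (k + 1) * 2 = 2 ^ (k + 2) := by ring
      rw [h3, h4]

-- ===== VERDICT (by name: the statement is the Claim_ definition above) =====
theorem shiftLeft_one_eq_pow : (fun i : Int => (1 : Int) <<< (((i + 1).toNat : Nat) : Int))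
    = (fun i : Int => (2 : Int) ^ (i + 1).toNat) := by
  funext i
  rw [Int.shiftLeft_natCast_right, Int.shiftLeft_eq, one_mul]

theorem multiplies_spec : Claim_equal_multiplies := by
  intro m _
  unfold Spec_multiplies multiplies multiplies_alt
  rw [shiftLeft_one_eq_pow]
  by_cases h : m - 1 ≤ 0
  · rw [PySem.List.pyRange_one_eq_nil (by omega)]
    simp
  · have : m - 1 = ((m - 1).toNat : Int) := by omega
    rw [this]
    exact multiplies_fold_eq_map (m - 1).toNat
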